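-- pv_equiv track=rewrite | github.com/everything-is-simple/lifespan-0.01 | src/mlq/data/data_timeframe_split_cleanup.py | _build_non_day_price_tables
-- ===== SOURCE A (Python) =====
-- NON_DAY_TIMEFRAMES: tuple[str, ...] = ("week", "month")
--
-- def _build_non_day_price_tables(table_map: dict[str, dict[str, str]]) -> tuple[str, ...]:
--     return tuple(
--         table_name
--         for timeframe in NON_DAY_TIMEFRAMES
--         for asset_tables in table_map.values()
--         for candidate_timeframe, table_name in asset_tables.items()
--         if candidate_timeframe == timeframe
--     )
-- ===== SOURCE B (Python) =====
-- NON_DAY_TIMEFRAMES: tuple[str, ...] = ("week", "month")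
--
-- def _build_non_day_price_tables(table_map):
--     # Single pass over the data, bucketing names per timeframe,
--     # then concatenating the buckets in NON_DAY_TIMEFRAMES order.
--     week, month = [], []
--     for asset_tables in table_map.values():
--         for timeframe, table_name in asset_tables.items():
--             if timeframe == "week":
--                 week.append(table_name)
--             elif timeframe == "month":
--                 month.append(table_name)
--     return tuple(week) + tuple(month)
-- ===== Notes on version B (the rewrite author's own statement) =====
-- stated objective: alternative
-- what changed: Replaces the double scan (one full pass over all asset tables per timeframe in NON_DAY_TIMEFRAMES) by a single pass that buckets table names into a week list and a month list and concatenates the buckets in timeframe order.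
import Mathlib
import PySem

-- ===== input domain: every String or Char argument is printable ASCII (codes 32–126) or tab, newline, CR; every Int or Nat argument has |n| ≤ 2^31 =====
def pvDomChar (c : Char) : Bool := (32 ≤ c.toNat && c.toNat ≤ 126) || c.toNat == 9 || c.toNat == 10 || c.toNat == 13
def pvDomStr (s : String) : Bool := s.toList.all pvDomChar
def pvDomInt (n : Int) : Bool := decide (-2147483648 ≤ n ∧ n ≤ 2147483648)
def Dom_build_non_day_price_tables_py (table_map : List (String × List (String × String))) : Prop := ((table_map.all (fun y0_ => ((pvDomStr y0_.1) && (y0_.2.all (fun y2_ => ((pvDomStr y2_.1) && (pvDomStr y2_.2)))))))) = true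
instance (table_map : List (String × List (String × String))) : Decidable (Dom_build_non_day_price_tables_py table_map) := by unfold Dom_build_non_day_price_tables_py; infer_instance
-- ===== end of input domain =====

-- B replaces A's per-timeframe full scan by one single pass that buckets names into week/month lists (objective: alternative decomposition; same measured cost).
-- Dicts are PySem.Dict built from the association lists (duplicate keys overwrite, Python dict semantics).

-- ===== PORT A =====
-- tuple(table_name for timeframe in NON_DAY_TIMEFRAMES for asset_tables in table_map.values()
--       for candidate_timeframe, table_name in asset_tables.items() if candidate_timeframe == timeframe)
def build_non_day_price_tables_py (table_map : List (String × List (String × String))) : List String :=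
  ["week", "month"].foldl (fun acc timeframe =>
    (PySem.Dict.ofList table_map).values.foldl (fun acc asset_tables =>
      (PySem.Dict.ofList asset_tables).items.foldl (fun acc q =>
        if q.1 == timeframe then acc ++ [q.2] else acc) acc) acc) []

-- ===== PORT B =====
def build_non_day_price_tables_py_alt (table_map : List (String × List (String × String))) : List String :=
  let buckets := (PySem.Dict.ofList table_map).values.foldl
    (fun (b : List String × List String) asset_tables =>
      (PySem.Dict.ofList asset_tables).items.foldl (fun b q =>
        if q.1 == "week" then (b.1 ++ [q.2], b.2)
        else if q.1 == "month" then (b.1, b.2 ++ [q.2])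
        else b) b) ([], [])
  buckets.1 ++ buckets.2

-- ===== PRECONDITION & SPEC =====
def Spec_build_non_day_price_tables_py (table_map : List (String × List (String × String))) (out : List String) : Prop := out = build_non_day_price_tables_py_alt table_map
instance (table_map : List (String × List (String × String))) (out : List String) : Decidable (Spec_build_non_day_price_tables_py table_map out) := by unfold Spec_build_non_day_price_tables_py; infer_instance

-- ===== CLAIM (what is proved, stated in full; the proofs are below) =====
def Claim_equal_build_non_day_price_tables_py : Prop := ∀ (table_map : List (String × List (String × String))), Dom_build_non_day_price_tables_py table_map → Spec_build_non_day_price_tables_py table_map (build_non_day_price_tables_py table_map)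

-- ===== LEMMAS AND PROOFS =====

-- the names of tables whose timeframe is tf, in source order
def pvPick (tf : String) (vs : List (List (String × String))) : List String :=
  vs.flatMap (fun at_ => ((PySem.Dict.ofList at_).items.filter (fun q => q.1 == tf)).map Prod.snd)

theorem pv_innerA (tf : String) (l : List (String × String)) (acc : List String) :
    l.foldl (fun acc q => if q.1 == tf then acc ++ [q.2] else acc) acc
      = acc ++ (l.filter (fun q => q.1 == tf)).map Prod.snd := by
  induction l generalizing acc with
  | nil => simp
  | cons q rest ih =>
    rw [List.foldl_cons, List.filter_cons]
    by_cases h : (q.1 == tf) = true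
    · rw [if_pos h, if_pos h, ih]; simp
    · rw [if_neg h, if_neg h, ih]

theorem pv_outerA (tf : String) (vs : List (List (String × String))) (acc : List String) :
    vs.foldl (fun acc asset_tables =>
        (PySem.Dict.ofList asset_tables).items.foldl (fun acc q =>
          if q.1 == tf then acc ++ [q.2] else acc) acc) acc
      = acc ++ pvPick tf vs := by
  induction vs generalizing acc with
  | nil => simp [pvPick]
  | cons a rest ih =>
    rw [List.foldl_cons]
    show List.foldl _ ((PySem.Dict.ofList a).items.foldl (fun acc q =>
          if q.1 == tf then acc ++ [q.2] else acc) acc) rest = _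
    rw [pv_innerA, ih]
    simp [pvPick, List.flatMap_cons]

theorem pv_innerB (l : List (String × String)) (b : List String × List String) :
    l.foldl (fun b q =>
        if q.1 == "week" then (b.1 ++ [q.2], b.2)
        else if q.1 == "month" then (b.1, b.2 ++ [q.2])
        else b) b
      = (b.1 ++ (l.filter (fun q => q.1 == "week")).map Prod.snd,
         b.2 ++ (l.filter (fun q => q.1 == "month")).map Prod.snd) := by
  induction l generalizing b with
  | nil => simp
  | cons q rest ih =>
    rw [List.foldl_cons, List.filter_cons, List.filter_cons]
    by_cases hw : (q.1 == "week") = true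
    · have hm : ¬ (q.1 == "month") = true := by simp_all
      rw [if_pos hw, if_pos hw, if_neg hm, ih]; simp
    · rw [if_neg hw, if_neg hw]
      by_cases hm : (q.1 == "month") = true
      · rw [if_pos hm, if_pos hm, ih]; simp
      · rw [if_neg hm, if_neg hm, ih]

theorem pv_outerB (vs : List (List (String × String))) (b : List String × List String) :
    vs.foldl (fun (b : List String × List String) asset_tables =>
        (PySem.Dict.ofList asset_tables).items.foldl (fun b q =>
          if q.1 == "week" then (b.1 ++ [q.2], b.2)
          else if q.1 == "month" then (b.1, b.2 ++ [q.2])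
          else b) b) b
      = (b.1 ++ pvPick "week" vs, b.2 ++ pvPick "month" vs) := by
  induction vs generalizing b with
  | nil => simp [pvPick]
  | cons a rest ih =>
    rw [List.foldl_cons]
    show List.foldl _ ((PySem.Dict.ofList a).items.foldl (fun b q =>
          if q.1 == "week" then (b.1 ++ [q.2], b.2)
          else if q.1 == "month" then (b.1, b.2 ++ [q.2])
          else b) b) rest = _
    rw [pv_innerB, ih]
    simp [pvPick, List.flatMap_cons]

-- ===== VERDICT (by name: the statement is the Claim_ definition above) =====
theorem build_non_day_price_tables_py_spec : Claim_equal_build_non_day_price_tables_py := by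
  intro table_map _
  unfold Spec_build_non_day_price_tables_py build_non_day_price_tables_py build_non_day_price_tables_py_alt
  rw [List.foldl_cons, List.foldl_cons, List.foldl_nil]
  rw [pv_outerA, pv_outerA, pv_outerB]
  simp
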